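-- pv_equiv track=rewrite | github.com/Tixierae/EMNLP2017_NewSum | code/ClusterRank_baseline/functions_ClusterRank_low.py | get_windows_combinations
-- ===== SOURCE A (Python) =====
-- def get_windows_combinations(window_threshold):
--     windows_combinations = list()
--     windows_combinations.append((1,1))
--
--     while (max(windows_combinations)[0] == max(windows_combinations)[1] == window_threshold)==False:
--         ti = max(range(len(windows_combinations)))
--         if windows_combinations[ti][0] == windows_combinations[ti][1]:
--             windows_combinations.append((1,windows_combinations[ti][1]+1))
--         if windows_combinations[ti][0] < windows_combinations[ti][1]:
--             windows_combinations.append((windows_combinations[ti][1],windows_combinations[ti][0]))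
--         if windows_combinations[ti][0] > windows_combinations[ti][1]:
--             windows_combinations.append((windows_combinations[ti][1]+1,windows_combinations[ti][0]))
--
--     return windows_combinations
-- ===== SOURCE B (Python) =====
-- def get_windows_combinations(window_threshold):
--     res = [(1, 1)]
--     for m in range(2, window_threshold + 1):
--         for k in range(1, m):
--             res.append((k, m))
--             res.append((m, k))
--         res.append((m, m))
--     return res
-- ===== Notes on version B (the rewrite author's own statement) =====
-- stated objective: simpler
-- what changed: Replaces A's while-loop state machine (which rescans the whole list with max() on every iteration to decide termination and inspects the last pair to pick one of three append branches) with a direct level-by-level construction using two nested for loops over the level index and the offset within the level.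
import Mathlib
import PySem

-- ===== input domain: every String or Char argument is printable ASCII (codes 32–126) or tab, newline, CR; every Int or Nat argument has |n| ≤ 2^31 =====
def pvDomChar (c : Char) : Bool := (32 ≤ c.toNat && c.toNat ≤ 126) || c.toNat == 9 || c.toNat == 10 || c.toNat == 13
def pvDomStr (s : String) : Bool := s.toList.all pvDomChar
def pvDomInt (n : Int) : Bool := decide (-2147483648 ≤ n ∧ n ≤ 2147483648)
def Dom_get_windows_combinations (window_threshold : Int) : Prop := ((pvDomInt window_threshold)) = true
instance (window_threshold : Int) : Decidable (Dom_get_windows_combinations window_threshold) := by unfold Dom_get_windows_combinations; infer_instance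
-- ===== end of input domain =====

-- B replaces A's while-loop state machine (a full max() scan per iteration plus a
-- last-element case analysis) by a direct nested for-loop construction of the same
-- sequence, level by level; equivalence is proved for window_threshold ≥ 1 (below 1
-- A's while loop never terminates).

-- ===== PORT A =====

-- exact port of Python's max() on a NONEMPTY list of int pairs: tuple comparison is
-- lexicographic and the first maximal element is kept; the loop's list is never empty
-- (Python max() would raise on [], hence the unreachable [] branch).
def pvPairLt (a b : Int × Int) : Bool := a.1 < b.1 || (a.1 == b.1 && a.2 < b.2)

def pvPyMax (l : List (Int × Int)) : Int × Int :=
  match l with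
  | [] => (0, 0)   -- unreachable: the loop list always contains (1,1)
  | h :: t => t.foldl (fun acc x => if pvPairLt acc x then x else acc) h

-- the while loop of A, one recursive call per iteration; fuel only makes the
-- recursion total (the proof shows t*t iterations always suffice on Pre_)
def pvLoopA (wt : Int) : List (Int × Int) → Nat → List (Int × Int)
  | ws, 0 => ws
  | ws, fuel + 1 =>
    let mx := pvPyMax ws
    if mx.1 == mx.2 && mx.2 == wt then ws
    else
      -- ti = max(range(len(ws))) = len(ws) - 1 (the list is nonempty, so no ValueError
      -- from max() and no IndexError from the subscript); all three ifs read
      -- windows_combinations[ti], which the appends do not move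
      let last := (PySem.List.pyGet? ws ((ws.length : Int) - 1)).getD (0, 0)
      let ws1 := ws ++ (if last.1 == last.2 then [((1 : Int), last.2 + 1)] else [])
      let ws2 := ws1 ++ (if last.1 < last.2 then [(last.2, last.1)] else [])
      let ws3 := ws2 ++ (if last.2 < last.1 then [(last.2 + 1, last.1)] else [])
      pvLoopA wt ws3 fuel

def get_windows_combinations (window_threshold : Int) : List (Int × Int) :=
  pvLoopA window_threshold [(1, 1)] (window_threshold.toNat * window_threshold.toNat)

-- ===== PORT B =====
def get_windows_combinations_alt (window_threshold : Int) : List (Int × Int) :=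
  (PySem.List.pyRange 2 (window_threshold + 1)).foldl
    (fun res m =>
      ((PySem.List.pyRange 1 m).foldl (fun r k => (r ++ [(k, m)]) ++ [(m, k)]) res)
        ++ [(m, m)])
    [(1, 1)]

-- ===== PRECONDITION & SPEC =====
-- Pre_ excludes window_threshold < 1, where A's while loop never terminates (A
-- returns on no such input; B returns its initial singleton list there).
def Pre_get_windows_combinations (window_threshold : Int) : Prop := 1 ≤ window_threshold
instance (window_threshold : Int) : Decidable (Pre_get_windows_combinations window_threshold) := by unfold Pre_get_windows_combinations; infer_instance
def pvWitness_get_windows_combinations : Int := 3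

def Spec_get_windows_combinations (window_threshold : Int) (out : List (Int × Int)) : Prop := out = get_windows_combinations_alt window_threshold
instance (window_threshold : Int) (out : List (Int × Int)) : Decidable (Spec_get_windows_combinations window_threshold out) := by unfold Spec_get_windows_combinations; infer_instance

-- ===== CLAIM (what is proved, stated in full; the proofs are below) =====
def Claim_equal_get_windows_combinations : Prop := ∀ (window_threshold : Int), Dom_get_windows_combinations window_threshold → Pre_get_windows_combinations window_threshold → Spec_get_windows_combinations window_threshold (get_windows_combinations window_threshold)

-- ===== LEMMAS AND PROOFS =====

-- the common value: the pairs that level m contributes, in emission order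
def pvRow (M : Int) (j : Nat) : List (Int × Int) :=
  (List.range j).flatMap (fun i => [((i : Int) + 1, M), (M, (i : Int) + 1)])

def pvPyr : Nat → List (Int × Int)
  | 0 => []
  | n + 1 => pvPyr n ++ pvRow ((n : Int) + 1) n ++ [((n : Int) + 1, (n : Int) + 1)]

theorem pvRow_zero (M : Int) : pvRow M 0 = [] := rfl

theorem pvRow_succ (M : Int) (j : Nat) :
    pvRow M (j + 1) = pvRow M j ++ [((j : Int) + 1, M), (M, (j : Int) + 1)] := by
  simp [pvRow, List.range_succ]

theorem mem_pvRow {M : Int} {j : Nat} {x : Int × Int} (hx : x ∈ pvRow M j) :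
    (x.2 = M ∧ 1 ≤ x.1 ∧ x.1 ≤ (j : Int)) ∨ (x.1 = M ∧ 1 ≤ x.2 ∧ x.2 ≤ (j : Int)) := by
  simp only [pvRow, List.mem_flatMap, List.mem_cons, List.not_mem_nil, or_false] at hx
  obtain ⟨i, hi, hmem⟩ := hx
  simp at hi
  obtain ⟨a, ha, rfl⟩ := hi
  rcases hmem with h | h <;> subst h
  · exact Or.inl ⟨rfl, show (1 : Int) ≤ (a : Int) + 1 by omega,
      show (a : Int) + 1 ≤ (j : Int) by omega⟩
  · exact Or.inr ⟨rfl, show (1 : Int) ≤ (a : Int) + 1 by omega,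
      show (a : Int) + 1 ≤ (j : Int) by omega⟩

theorem mem_pvPyr {n : Nat} {x : Int × Int} (hx : x ∈ pvPyr n) :
    1 ≤ x.1 ∧ x.1 ≤ (n : Int) ∧ 1 ≤ x.2 ∧ x.2 ≤ (n : Int) := by
  induction n with
  | zero => simp [pvPyr] at hx
  | succ n ih =>
    simp only [pvPyr, List.mem_append, List.mem_singleton] at hx
    rcases hx with (h | h) | h
    · have := ih h; push_cast; omega
    · rcases mem_pvRow h with ⟨h1, h2, h3⟩ | ⟨h1, h2, h3⟩ <;> push_cast <;> omega
    · subst h; dsimp only; push_cast; omega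

-- pvPyMax returns an element of its (nonempty) argument
theorem pvPyMax_foldl_mem (t : List (Int × Int)) :
    ∀ acc, t.foldl (fun acc x => if pvPairLt acc x then x else acc) acc = acc ∨
      t.foldl (fun acc x => if pvPairLt acc x then x else acc) acc ∈ t := by
  induction t with
  | nil => intro acc; left; rfl
  | cons y t ih =>
    intro acc
    simp only [List.foldl_cons]
    by_cases h : pvPairLt acc y = true
    · rw [if_pos h]
      rcases ih y with h' | h'
      · right; rw [h']; exact List.mem_cons_self
      · right; exact List.mem_cons_of_mem _ h'
    · rw [if_neg h]
      rcases ih acc with h' | h'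
      · left; exact h'
      · right; exact List.mem_cons_of_mem _ h'

theorem pvPyMax_mem {l : List (Int × Int)} (h : l ≠ []) : pvPyMax l ∈ l := by
  match l with
  | [] => exact absurd rfl h
  | h' :: t =>
    simp only [pvPyMax]
    rcases pvPyMax_foldl_mem t h' with h1 | h1
    · rw [h1]; exact List.mem_cons_self
    · exact List.mem_cons_of_mem _ h1

-- if M is in the list and every element is M or lexicographically below it,
-- the fold returns M
theorem pvPyMax_eq {l : List (Int × Int)} {M : Int × Int} (hM : M ∈ l)
    (hd : ∀ x ∈ l, x = M ∨ pvPairLt x M = true) : pvPyMax l = M := by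
  match l with
  | [] => simp at hM
  | h :: t =>
    simp only [pvPyMax]
    have key : ∀ (t : List (Int × Int)) (acc : Int × Int),
        (∀ x ∈ t, x = M ∨ pvPairLt x M = true) →
        (acc = M ∨ pvPairLt acc M = true) →
        (M = acc ∨ M ∈ t) →
        t.foldl (fun acc x => if pvPairLt acc x then x else acc) acc = M := by
      intro t
      induction t with
      | nil =>
        intro acc _ hacc hmem
        rcases hmem with h1 | h1
        · simpa using h1.symm
        · simp at h1
      | cons y t ih =>
        intro acc hall hacc hmem
        simp only [List.foldl_cons]
        have hy := hall y List.mem_cons_self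
        have hall' : ∀ x ∈ t, x = M ∨ pvPairLt x M = true :=
          fun x hx => hall x (List.mem_cons_of_mem _ hx)
        have hacc' : (if pvPairLt acc y then y else acc) = M ∨
            pvPairLt (if pvPairLt acc y then y else acc) M = true := by
          by_cases h : pvPairLt acc y = true <;> simp [h] <;> tauto
        apply ih _ hall' hacc'
        rcases hmem with h1 | h1
        · -- acc = M
          subst h1
          left
          by_cases h : pvPairLt M y = true
          · rcases hy with h2 | h2
            · simp [h2]
            · exfalso
              simp only [pvPairLt, Bool.or_eq_true, decide_eq_true_eq,
                Bool.and_eq_true, beq_iff_eq] at h h2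
              omega
          · simp [h]
        · rcases List.mem_cons.mp h1 with h2 | h2
          · -- M = y
            subst h2
            left
            by_cases h : pvPairLt acc M = true
            · simp [h]
            · rcases hacc with h3 | h3
              · simp [h3]
              · exact absurd h3 h
          · right; exact h2
    rcases List.mem_cons.mp hM with h1 | h1
    · exact key t h (fun x hx => hd x (List.mem_cons_of_mem _ hx))
        (Or.inl h1.symm) (Or.inl h1)
    · exact key t h (fun x hx => hd x (List.mem_cons_of_mem _ hx))
        (hd h List.mem_cons_self) (Or.inr h1)

-- the loop's guard is false whenever no element of the list is (wt,wt)
theorem pvCond_false {wt : Int} {l : List (Int × Int)} (hne : l ≠ [])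
    (h : ∀ x ∈ l, ¬(x.1 = x.2 ∧ x.2 = wt)) :
    ((pvPyMax l).1 == (pvPyMax l).2 && (pvPyMax l).2 == wt) = false := by
  have hmem := pvPyMax_mem hne
  have := h _ hmem
  simp only [Bool.and_eq_false_iff, beq_eq_false_iff_ne, ne_eq]
  by_cases h1 : (pvPyMax l).1 = (pvPyMax l).2
  · right; intro h2; exact this ⟨h1, h2⟩
  · left; exact h1

-- reading windows_combinations[len-1]
theorem pvLast_get (l : List (Int × Int)) (x : Int × Int) :
    (PySem.List.pyGet? (l ++ [x]) (((l ++ [x]).length : Int) - 1)).getD (0, 0) = x := by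
  have h : ((l ++ [x]).length : Int) - 1 = (l.length : Int) := by simp
  rw [h]
  simp [PySem.List.pyGet?, PySem.List.pyIdx?]

-- one loop iteration from a state with a known last element and a false guard
theorem pvLoopA_step {wt : Int} (l : List (Int × Int)) (a : Int × Int) (fuel : Nat)
    (hc : ((pvPyMax (l ++ [a])).1 == (pvPyMax (l ++ [a])).2 &&
           (pvPyMax (l ++ [a])).2 == wt) = false) :
    pvLoopA wt (l ++ [a]) (fuel + 1) =
      pvLoopA wt ((((l ++ [a]) ++ (if a.1 == a.2 then [((1 : Int), a.2 + 1)] else []))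
        ++ (if a.1 < a.2 then [(a.2, a.1)] else []))
        ++ (if a.2 < a.1 then [(a.2 + 1, a.1)] else [])) fuel := by
  rw [pvLoopA]
  simp only [hc, Bool.false_eq_true, if_false, pvLast_get]

-- the three specialized iteration shapes (one per Python if-branch)
theorem pvStep_eq {wt : Int} (l : List (Int × Int)) (a : Int × Int) (fuel : Nat)
    (hc : ((pvPyMax (l ++ [a])).1 == (pvPyMax (l ++ [a])).2 &&
           (pvPyMax (l ++ [a])).2 == wt) = false) (h : a.1 = a.2) :
    pvLoopA wt (l ++ [a]) (fuel + 1) =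
      pvLoopA wt ((l ++ [a]) ++ [((1 : Int), a.2 + 1)]) fuel := by
  rw [pvLoopA_step _ _ _ hc]
  rw [if_pos (beq_iff_eq.mpr h), if_neg (by omega), if_neg (by omega)]
  simp

theorem pvStep_lt {wt : Int} (l : List (Int × Int)) (a : Int × Int) (fuel : Nat)
    (hc : ((pvPyMax (l ++ [a])).1 == (pvPyMax (l ++ [a])).2 &&
           (pvPyMax (l ++ [a])).2 == wt) = false) (h : a.1 < a.2) :
    pvLoopA wt (l ++ [a]) (fuel + 1) =
      pvLoopA wt ((l ++ [a]) ++ [(a.2, a.1)]) fuel := by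
  rw [pvLoopA_step _ _ _ hc]
  rw [if_neg (by simp; omega), if_pos h, if_neg (by omega)]
  simp

theorem pvStep_gt {wt : Int} (l : List (Int × Int)) (a : Int × Int) (fuel : Nat)
    (hc : ((pvPyMax (l ++ [a])).1 == (pvPyMax (l ++ [a])).2 &&
           (pvPyMax (l ++ [a])).2 == wt) = false) (h : a.2 < a.1) :
    pvLoopA wt (l ++ [a]) (fuel + 1) =
      pvLoopA wt ((l ++ [a]) ++ [(a.2 + 1, a.1)]) fuel := by
  rw [pvLoopA_step _ _ _ hc]
  rw [if_neg (by simp; omega), if_neg (by omega), if_pos h]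
  simp

-- number of iterations to finish levels m+1 … m+d
def pvSteps : Nat → Nat → Nat
  | _, 0 => 0
  | m, d + 1 => 2 * m + 1 + pvSteps (m + 1) d

theorem pvSteps_sq : ∀ (d m : Nat), pvSteps m d + m * m = (m + d) * (m + d) := by
  intro d
  induction d with
  | zero => intro m; simp [pvSteps]
  | succ d ih =>
    intro m
    have h := ih (m + 1)
    simp only [pvSteps]
    have e : m + (d + 1) = (m + 1) + d := by omega
    rw [e, ← h]
    have e2 : (m + 1) * (m + 1) = m * m + 2 * m + 1 := by ring
    omega

-- no element of a partially built level can satisfy the guard while n+1 < wt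
theorem pvNoDiag {wt : Int} {n j : Nat} (hlt : (n : Int) + 1 < wt) (hj : j ≤ n + 1) :
    ∀ x ∈ pvPyr (n + 1) ++ pvRow ((n : Int) + 2) j, ¬(x.1 = x.2 ∧ x.2 = wt) := by
  intro x hx
  rcases List.mem_append.mp hx with h | h
  · have := mem_pvPyr h; push_cast at this; omega
  · rcases mem_pvRow h with ⟨h1, h2, h3⟩ | ⟨h1, h2, h3⟩ <;>
    · intro hcontra; omega

theorem pvPyr_ne_nil (n : Nat) : pvPyr (n + 1) ≠ [] := by
  simp [pvPyr]

-- shape of the level-(n+2) states, exposing the last element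
theorem pvState_zero (n : Nat) :
    pvPyr (n + 1) ++ pvRow ((n : Int) + 2) 0 =
      (pvPyr n ++ pvRow ((n : Int) + 1) n) ++ [((n : Int) + 1, (n : Int) + 1)] := by
  simp [pvPyr, pvRow]

theorem pvState_succ (n j : Nat) :
    pvPyr (n + 1) ++ pvRow ((n : Int) + 2) (j + 1) =
      ((pvPyr (n + 1) ++ pvRow ((n : Int) + 2) j) ++ [((j : Int) + 1, (n : Int) + 2)])
        ++ [((n : Int) + 2, (j : Int) + 1)] := by
  rw [pvRow_succ]
  simp [List.append_assoc]

-- advancing through one whole level: from pyr(n+1) ++ row j to pyr(n+2)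
theorem pvAdvance {wt : Int} {n : Nat} (hlt : (n : Int) + 1 < wt) :
    ∀ (d j : Nat), j + d = n + 1 → ∀ f : Nat,
      pvLoopA wt (pvPyr (n + 1) ++ pvRow ((n : Int) + 2) j) (2 * d + 1 + f) =
        pvLoopA wt (pvPyr (n + 2)) f := by
  intro d
  induction d with
  | zero =>
    intro j hjd f
    have hj : j = n + 1 := by omega
    subst hj
    have hc := pvCond_false (wt := wt)
      (l := pvPyr (n + 1) ++ pvRow ((n : Int) + 2) (n + 1))
      (by simp [pvPyr_ne_nil n]) (pvNoDiag hlt (le_refl _))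
    rw [show (2 * 0 + 1 + f) = f + 1 from by omega]
    rw [pvState_succ n n] at hc ⊢
    rw [pvStep_gt _ _ _ hc (by dsimp; omega)]
    rw [← pvState_succ n n]
    show _ = pvLoopA wt (pvPyr (n + 1 + 1)) f
    conv_rhs => rw [pvPyr]
    push_cast
    ring_nf
  | succ d ih =>
    intro j hjd f
    have hjn : j ≤ n := by omega
    rw [show (2 * (d + 1) + 1 + f) = (2 * d + 1 + f) + 1 + 1 from by omega]
    -- step 1: append (j+1, n+2)
    have hc1 := pvCond_false (wt := wt)
      (l := pvPyr (n + 1) ++ pvRow ((n : Int) + 2) j)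
      (by simp [pvPyr_ne_nil n]) (pvNoDiag hlt (by omega))
    have step1 : pvLoopA wt (pvPyr (n + 1) ++ pvRow ((n : Int) + 2) j) ((2 * d + 1 + f) + 1 + 1) =
        pvLoopA wt ((pvPyr (n + 1) ++ pvRow ((n : Int) + 2) j) ++ [((j : Int) + 1, (n : Int) + 2)])
          ((2 * d + 1 + f) + 1) := by
      match j, hjn with
      | 0, _ =>
        rw [pvState_zero n] at hc1 ⊢
        rw [pvStep_eq _ _ _ hc1 rfl]
        rw [← pvState_zero n]
        push_cast
        ring_nf
      | j + 1, hjn =>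
        rw [pvState_succ n j] at hc1 ⊢
        rw [pvStep_gt _ _ _ hc1 (by dsimp; omega)]
        rw [← pvState_succ n j]
        push_cast
        ring_nf
    -- step 2: append (n+2, j+1), completing row j+1
    have hc2 : ((pvPyMax ((pvPyr (n + 1) ++ pvRow ((n : Int) + 2) j) ++ [((j : Int) + 1, (n : Int) + 2)])).1 ==
        (pvPyMax ((pvPyr (n + 1) ++ pvRow ((n : Int) + 2) j) ++ [((j : Int) + 1, (n : Int) + 2)])).2 &&
        (pvPyMax ((pvPyr (n + 1) ++ pvRow ((n : Int) + 2) j) ++ [((j : Int) + 1, (n : Int) + 2)])).2 == wt) = false := by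
      apply pvCond_false (by simp)
      intro x hx
      rcases List.mem_append.mp hx with h | h
      · exact pvNoDiag hlt (by omega) x h
      · simp only [List.mem_singleton] at h
        subst h
        intro hcontra
        dsimp at hcontra
        omega
    have step2 : pvLoopA wt ((pvPyr (n + 1) ++ pvRow ((n : Int) + 2) j) ++ [((j : Int) + 1, (n : Int) + 2)])
          ((2 * d + 1 + f) + 1) =
        pvLoopA wt (pvPyr (n + 1) ++ pvRow ((n : Int) + 2) (j + 1)) (2 * d + 1 + f) := by
      rw [pvStep_lt _ _ _ hc2 (by dsimp; omega)]
      rw [pvState_succ n j]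
    rw [step1, step2]
    exact ih (j + 1) (by omega) f

-- once the list is the full pyramid of wt levels, the guard is true
theorem pvTerm {wt : Int} {n : Nat} (hwt : (n : Int) + 1 = wt) :
    ∀ f : Nat, pvLoopA wt (pvPyr (n + 1)) f = pvPyr (n + 1) := by
  intro f
  match f with
  | 0 => rfl
  | f + 1 =>
    rw [pvLoopA]
    have hmax : pvPyMax (pvPyr (n + 1)) = ((n : Int) + 1, (n : Int) + 1) := by
      apply pvPyMax_eq
      · show _ ∈ pvPyr (n + 1)
        rw [pvPyr]
        simp
      · intro x hx
        have := mem_pvPyr hx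
        push_cast at this
        by_cases h : x = ((n : Int) + 1, (n : Int) + 1)
        · left; exact h
        · right
          simp only [pvPairLt, Bool.or_eq_true, decide_eq_true_eq, Bool.and_eq_true,
            beq_iff_eq]
          rcases lt_or_eq_of_le this.2.1 with h1 | h1
          · left; exact h1
          · right
            refine ⟨h1, ?_⟩
            rcases lt_or_eq_of_le this.2.2.2 with h2 | h2
            · exact h2
            · exfalso; apply h; ext <;> simp [h1, h2]
    rw [hmax]
    simp [hwt]

-- climbing all remaining levels
theorem pvClimb {wt : Int} : ∀ (d n : Nat), ((n : Int) + 1) + (d : Int) = wt → ∀ f : Nat,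
    pvLoopA wt (pvPyr (n + 1)) (pvSteps (n + 1) d + f) = pvPyr (n + 1 + d) := by
  intro d
  induction d with
  | zero =>
    intro n hn f
    simp only [pvSteps, Nat.zero_add, Nat.add_zero]
    exact pvTerm (by push_cast at hn ⊢; omega) f
  | succ d ih =>
    intro n hn f
    have hlt : (n : Int) + 1 < wt := by push_cast at hn; omega
    have h0 := pvAdvance (wt := wt) hlt (n + 1) 0 (by omega) (pvSteps (n + 1 + 1) d + f)
    simp only [pvRow_zero, List.append_nil] at h0
    have hfuel : pvSteps (n + 1) (d + 1) + f = 2 * (n + 1) + 1 + (pvSteps (n + 1 + 1) d + f) := by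
      rw [pvSteps]; omega
    rw [hfuel, h0]
    have h1 := ih (n + 1) (by push_cast at hn ⊢; omega) f
    have e : pvPyr (n + 2) = pvPyr (n + 1 + 1) := rfl
    rw [e, h1]
    congr 1
    omega

theorem pvPyr_one : pvPyr 1 = [(1, 1)] := by simp [pvPyr, pvRow]

-- A's port computes the pyramid
theorem pvA_eq_pyr {wt : Int} (hwt : 1 ≤ wt) :
    get_windows_combinations wt = pvPyr wt.toNat := by
  have hN : 1 ≤ wt.toNat := by omega
  obtain ⟨n, hn⟩ : ∃ n, wt.toNat = n + 1 := ⟨wt.toNat - 1, by omega⟩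
  have hfuel : wt.toNat * wt.toNat = pvSteps 1 n + 1 := by
    have h1 := pvSteps_sq n 1
    have e : (1 + n) * (1 + n) = (n + 1) * (n + 1) := by ring
    rw [hn]
    omega
  unfold get_windows_combinations
  rw [hfuel, ← pvPyr_one]
  have hcast : ((0 : Nat) : Int) + 1 + (n : Int) = wt := by
    have : (wt.toNat : Int) = wt := by omega
    rw [← this, hn]; push_cast; ring
  have := pvClimb (wt := wt) n 0 hcast 1
  simp only [Nat.zero_add] at this
  rw [show pvSteps 1 n + 1 = pvSteps (0 + 1) n + 1 from by norm_num]
  rw [this, hn]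
  congr 1
  omega

-- B's inner loop builds one row
theorem pvB_inner (M : Int) : ∀ (j : Nat) (res : List (Int × Int)),
    (PySem.List.pyRange 1 ((j : Int) + 1)).foldl
      (fun r k => (r ++ [(k, M)]) ++ [(M, k)]) res = res ++ pvRow M j := by
  intro j
  induction j with
  | zero =>
    intro res
    simp [PySem.List.pyRange, pvRow]
  | succ j ih =>
    intro res
    rw [show ((j + 1 : Nat) : Int) + 1 = ((j : Int) + 1) + 1 from by push_cast; ring]
    rw [PySem.List.pyRange_one_succ_right (by omega)]
    rw [List.foldl_append]
    simp only [List.foldl_cons, List.foldl_nil]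
    rw [ih res, pvRow_succ]
    simp [List.append_assoc]

-- B's outer loop builds the pyramid
theorem pvB_outer : ∀ n : Nat,
    (PySem.List.pyRange 2 ((n : Int) + 2)).foldl
      (fun res m =>
        ((PySem.List.pyRange 1 m).foldl (fun r k => (r ++ [(k, m)]) ++ [(m, k)]) res)
          ++ [(m, m)])
      [(1, 1)] = pvPyr (n + 1) := by
  intro n
  induction n with
  | zero =>
    rw [show ((0 : Nat) : Int) + 2 = 2 from by norm_num]
    rw [show PySem.List.pyRange 2 2 = [] from by simp [PySem.List.pyRange]]
    simp [pvPyr_one]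
  | succ n ih =>
    rw [show ((n + 1 : Nat) : Int) + 2 = ((n : Int) + 2) + 1 from by push_cast; ring]
    rw [PySem.List.pyRange_one_succ_right (by omega)]
    rw [List.foldl_append]
    simp only [List.foldl_cons, List.foldl_nil]
    rw [ih]
    rw [show ((n : Int) + 2) = ((n + 1 : Nat) : Int) + 1 from by push_cast; ring]
    rw [pvB_inner]
    conv_rhs => rw [pvPyr]

theorem pvB_eq_pyr {wt : Int} (hwt : 1 ≤ wt) :
    get_windows_combinations_alt wt = pvPyr wt.toNat := by
  obtain ⟨n, hn⟩ : ∃ n, wt.toNat = n + 1 := ⟨wt.toNat - 1, by omega⟩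
  unfold get_windows_combinations_alt
  have hcast : wt + 1 = (n : Int) + 2 := by
    have : (wt.toNat : Int) = wt := by omega
    rw [← this, hn]; push_cast; ring
  rw [hcast, pvB_outer, hn]

-- ===== VERDICT (by name: the statement is the Claim_ definition above) =====
theorem get_windows_combinations_spec : Claim_equal_get_windows_combinations := by
  intro wt _ hpre
  unfold Spec_get_windows_combinations
  rw [pvA_eq_pyr hpre, pvB_eq_pyr hpre]
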